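-- pv_equiv track=rewrite | github.com/CostaLab/practical_SS2015 | algorithms/stat_tests/qgram_contingency_test.py | _get_qgramlist_help
-- ===== SOURCE A (Python) =====
-- def _get_qgramlist_help(qgram, result):
--     """Substitute N with A, C, G or T and return resulting q-grams"""
--     if qgram.count('N') == 0:
--         result.append(qgram)
--     else:
--         i = qgram.index("N")
--         for n in ['A','C','G','T']:
--             new_qgram = qgram[:i] + n + qgram[i+1:]
--             _get_qgramlist_help(new_qgram, result)
--     return result
-- ===== SOURCE B (Python) =====
-- def _get_qgramlist_help(qgram, result):
--     """Substitute N with A, C, G or T and return resulting q-grams"""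
--     positions = [i for i, c in enumerate(qgram) if c == 'N']
--     variants = [qgram]
--     for i in positions:
--         nxt = []
--         for v in variants:
--             for b in 'ACGT':
--                 nxt.append(v[:i] + b + v[i+1:])
--         variants = nxt
--     result.extend(variants)
--     return result
-- ===== Notes on version B (the rewrite author's own statement) =====
-- stated objective: alternative
-- what changed: Replaces A's depth-first recursion on the first 'N' with a single iterative pass: collect all 'N' positions once, then expand the variant list layer by layer over those positions (breadth-first product), extending result at the end.
import Mathlib
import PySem

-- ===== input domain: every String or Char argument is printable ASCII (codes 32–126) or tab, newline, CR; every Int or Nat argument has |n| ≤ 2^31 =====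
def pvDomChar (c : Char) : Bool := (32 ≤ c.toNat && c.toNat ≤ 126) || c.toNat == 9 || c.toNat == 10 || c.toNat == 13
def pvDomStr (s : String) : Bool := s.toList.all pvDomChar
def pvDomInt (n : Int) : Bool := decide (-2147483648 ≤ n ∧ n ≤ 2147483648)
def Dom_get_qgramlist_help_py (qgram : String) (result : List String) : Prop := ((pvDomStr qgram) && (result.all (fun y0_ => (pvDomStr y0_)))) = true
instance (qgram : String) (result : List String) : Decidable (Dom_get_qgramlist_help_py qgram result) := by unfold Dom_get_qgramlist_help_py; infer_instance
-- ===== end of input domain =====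

-- B replaces A's depth-first recursion on the first 'N' by one pass: collect all 'N'
-- positions, then expand the variant list layer by layer (objective: alternative /
-- iterative decomposition; same cost). Equivalence is about the returned list; both
-- Pythons extend `result` in place in the same way.

-- ===== PORT A =====
-- A works on the string's characters; `qgram.count('N')` with a single-character
-- needle is `List.count 'N'`, and `qgram.index('N')` (called only when an 'N' is
-- present, so it never raises) is `List.idxOf 'N'`; the slices `qgram[:i]` and
-- `qgram[i+1:]` with 0 ≤ i < len are exactly `take i` / `drop (i+1)`.
-- Termination lemma for A's recursion (cited by decreasing_by):
theorem pvCountRepl_lt (cs : List Char) (b : Char) (hb : b ≠ 'N') (h : 'N' ∈ cs) :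
    (cs.take (cs.idxOf 'N') ++ b :: cs.drop (cs.idxOf 'N' + 1)).count 'N' < cs.count 'N' := by
  induction cs with
  | nil => cases h
  | cons c cs ih =>
    by_cases hc : c = 'N'
    · subst hc
      simp [hb]
    · have h' : 'N' ∈ cs := by
        rcases List.mem_cons.mp h with h1 | h1
        · exact absurd h1.symm hc
        · exact h1
      rw [List.idxOf_cons_ne _ hc]
      simpa [List.count_cons, hc] using ih h'

def pvGoA (cs : List Char) (res : List String) : List String :=
  if _h : cs.count 'N' = 0 then
    res ++ [String.ofList cs]
  else
    (['A', 'C', 'G', 'T'] : List Char).attach.foldl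
      (fun r n =>
        pvGoA (cs.take (cs.idxOf 'N') ++ n.1 :: cs.drop (cs.idxOf 'N' + 1)) r)
      res
termination_by cs.count 'N'
decreasing_by
  exact pvCountRepl_lt cs n.1 (by rcases n with ⟨x, hx⟩; fin_cases hx <;> decide)
    (List.count_pos_iff.mp (Nat.pos_of_ne_zero _h))

def get_qgramlist_help_py (qgram : String) (result : List String) : List String :=
  pvGoA qgram.toList result

-- ===== PORT B =====
-- Literal port of Source B: the comprehension over enumerate gives the (Int) positions
-- of 'N'; the layered loop is a foldl over those positions, the two inner loops a
-- flatMap/map; `v[:i] + b + v[i+1:]` (b a one-character string from 'ACGT') is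
-- slice ++ b :: slice.
def get_qgramlist_help_py_alt (qgram : String) (result : List String) : List String :=
  let positions : List Int :=
    ((PySem.List.enumerate qgram.toList 0).filter (fun p => p.2 == 'N')).map (fun p => p.1)
  let variants : List (List Char) :=
    positions.foldl
      (fun vs i =>
        vs.flatMap (fun v =>
          (['A', 'C', 'G', 'T'] : List Char).map (fun b =>
            PySem.List.slice v none (some i) ++ b :: PySem.List.slice v (some (i + 1)) none)))
      [qgram.toList]
  result ++ variants.map String.ofList

-- ===== PRECONDITION & SPEC =====
def Spec_get_qgramlist_help_py (qgram : String) (result : List String) (out : List String) : Prop := out = get_qgramlist_help_py_alt qgram result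
instance (qgram : String) (result : List String) (out : List String) : Decidable (Spec_get_qgramlist_help_py qgram result out) := by unfold Spec_get_qgramlist_help_py; infer_instance

-- ===== CLAIM (what is proved, stated in full; the proofs are below) =====
def Claim_equal_get_qgramlist_help_py : Prop := ∀ (qgram : String) (result : List String), Dom_get_qgramlist_help_py qgram result → Spec_get_qgramlist_help_py qgram result (get_qgramlist_help_py qgram result)

-- ===== LEMMAS AND PROOFS =====

def pvStep (vs : List (List Char)) (i : Int) : List (List Char) :=
  vs.flatMap (fun v =>
    (['A', 'C', 'G', 'T'] : List Char).map (fun b =>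
      PySem.List.slice v none (some i) ++ b :: PySem.List.slice v (some (i + 1)) none))

def pvNpos (cs : List Char) : List Int :=
  ((PySem.List.enumerate cs 0).filter (fun p => p.2 == 'N')).map (fun p => p.1)

def pvExpand (cs : List Char) : List (List Char) :=
  (pvNpos cs).foldl pvStep [cs]

theorem pvAlt_eq (qgram : String) (result : List String) :
    get_qgramlist_help_py_alt qgram result = result ++ (pvExpand qgram.toList).map String.ofList := by
  rfl

-- no 'N' in P ⇒ the enumerate-filter pass over P is empty (any start)
theorem pvFilter_nil (P : List Char) (s : Int) (h : 'N' ∉ P) :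
    (PySem.List.enumerate P s).filter (fun p => p.2 == 'N') = [] := by
  induction P generalizing s with
  | nil => simp [PySem.List.enumerate_nil]
  | cons c cs ih =>
    have hc : c ≠ 'N' := fun hc => h (hc ▸ List.mem_cons_self)
    simp only [PySem.List.enumerate_cons, List.filter_cons]
    simp [hc, ih _ (fun hm => h (List.mem_cons_of_mem _ hm))]

-- Decomposition of a string at its first 'N' (used by the termination lemma and the proofs):
theorem pvDecomp (cs : List Char) (h : 'N' ∈ cs) :
    ∃ P S, cs = P ++ 'N' :: S ∧ 'N' ∉ P ∧ cs.idxOf 'N' = P.length := by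
  induction cs with
  | nil => cases h
  | cons c cs ih =>
    by_cases hc : c = 'N'
    · exact ⟨[], cs, by simp [hc], by simp, by simp [hc]⟩
    · have h' : 'N' ∈ cs := by
        rcases List.mem_cons.mp h with h1 | h1
        · exact absurd h1.symm hc
        · exact h1
      obtain ⟨P, S, hEq, hP, hIdx⟩ := ih h'
      refine ⟨c :: P, S, by simp [hEq], by simp [hP, Ne.symm hc], ?_⟩
      rw [List.idxOf_cons_ne _ hc, hIdx]
      rfl

theorem pvTake_left (P : List Char) (x : Char) (S : List Char) :
    (P ++ x :: S).take P.length = P := by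
  simp

theorem pvDrop_left (P : List Char) (x : Char) (S : List Char) :
    (P ++ x :: S).drop (P.length + 1) = S := by
  rw [← List.drop_drop]
  simp

-- positions of P ++ x :: S for an 'N'-free prefix P
theorem pvNpos_append (P : List Char) (x : Char) (S : List Char) (hP : 'N' ∉ P) :
    pvNpos (P ++ x :: S) =
      (if x = 'N' then [(P.length : Int)] else []) ++
        ((PySem.List.enumerate S ((P.length : Int) + 1)).filter (fun p => p.2 == 'N')).map (fun p => p.1) := by
  unfold pvNpos
  rw [PySem.List.enumerate_append, PySem.List.enumerate_cons]
  rw [List.filter_append, pvFilter_nil P 0 hP]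
  by_cases hx : x = 'N' <;>
    simp [hx, add_comm]

-- one step of B at the first 'N' position produces the four substituted strings
theorem pvStep_single (P : List Char) (x : Char) (S : List Char) :
    pvStep [P ++ x :: S] (P.length : Int) =
      (['A', 'C', 'G', 'T'] : List Char).map (fun b => P ++ b :: S) := by
  unfold pvStep
  have h1 : PySem.List.slice (P ++ x :: S) none (some (P.length : Int)) = P := by
    rw [PySem.List.slice_to_natCast]; exact pvTake_left P x S
  have h2 : PySem.List.slice (P ++ x :: S) (some ((P.length : Int) + 1)) none = S := by
    have : ((P.length : Int) + 1) = ((P.length + 1 : Nat) : Int) := by push_cast; ring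
    rw [this, PySem.List.slice_from_natCast]; exact pvDrop_left P x S
  simp only [List.flatMap_cons, List.flatMap_nil, h1, h2, List.append_nil]

-- the layered fold distributes over appending variant lists
theorem pvFoldl_append (ps : List Int) (xs ys : List (List Char)) :
    ps.foldl pvStep (xs ++ ys) = ps.foldl pvStep xs ++ ps.foldl pvStep ys := by
  induction ps generalizing xs ys with
  | nil => rfl
  | cons i ps ih =>
    simp only [List.foldl_cons]
    rw [show pvStep (xs ++ ys) i = pvStep xs i ++ pvStep ys i from by
      unfold pvStep; simp, ih]

-- main invariant: A's recursion appends exactly B's expansion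
theorem pvMain : ∀ (n : ℕ) (cs : List Char), cs.count 'N' = n →
    ∀ res, pvGoA cs res = res ++ (pvExpand cs).map String.ofList := by
  intro n
  induction n using Nat.strong_induction_on with
  | _ n ih =>
    intro cs hn res
    by_cases h0 : cs.count 'N' = 0
    · rw [pvGoA]
      have hmem : 'N' ∉ cs := by
        intro hm; exact absurd (List.count_pos_iff.mpr hm) (by omega)
      have : pvNpos cs = [] := by
        unfold pvNpos; rw [pvFilter_nil cs 0 hmem]; rfl
      simp [h0, pvExpand, this]
    · have hmem : 'N' ∈ cs := List.count_pos_iff.mp (Nat.pos_of_ne_zero h0)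
      obtain ⟨P, S, hEq, hP, hIdx⟩ := pvDecomp cs hmem
      -- counts
      have hcount : ∀ b : Char, b ≠ 'N' → (P ++ b :: S).count 'N' < n := by
        intro b hb
        have : (P ++ b :: S).count 'N' + 1 = cs.count 'N' := by
          rw [hEq]; simp [List.count_append, hb]; omega
        omega
      have hrepl : ∀ b : Char,
          cs.take (cs.idxOf 'N') ++ b :: cs.drop (cs.idxOf 'N' + 1) = P ++ b :: S := by
        intro b
        rw [hIdx, hEq, pvTake_left, pvDrop_left]
      -- tail positions are shared by cs and every substituted string
      have htail : ∀ b : Char, b ≠ 'N' →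
          pvNpos (P ++ b :: S) =
            ((PySem.List.enumerate S ((P.length : Int) + 1)).filter (fun p => p.2 == 'N')).map (fun p => p.1) := by
        intro b hb
        rw [pvNpos_append P b S hP]; simp [hb]
      have hhead : pvNpos cs = (P.length : Int) ::
          ((PySem.List.enumerate S ((P.length : Int) + 1)).filter (fun p => p.2 == 'N')).map (fun p => p.1) := by
        rw [hEq, pvNpos_append P 'N' S hP]; simp
      set T := ((PySem.List.enumerate S ((P.length : Int) + 1)).filter (fun p => p.2 == 'N')).map (fun p => p.1) with hT
      -- B side: expand cs into the four sub-expansions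
      have hexp : pvExpand cs =
          pvExpand (P ++ 'A' :: S) ++ pvExpand (P ++ 'C' :: S) ++
          pvExpand (P ++ 'G' :: S) ++ pvExpand (P ++ 'T' :: S) := by
        unfold pvExpand
        rw [hhead, List.foldl_cons]
        rw [show pvStep [cs] (P.length : Int) =
              [P ++ 'A' :: S] ++ [P ++ 'C' :: S] ++ [P ++ 'G' :: S] ++ [P ++ 'T' :: S] from by
          rw [hEq, pvStep_single]; rfl]
        rw [pvFoldl_append, pvFoldl_append, pvFoldl_append]
        rw [htail 'A' (by decide), htail 'C' (by decide), htail 'G' (by decide),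
          htail 'T' (by decide)]
      -- A side: unfold the four recursive calls
      rw [pvGoA]
      simp only [h0, dite_false]
      rw [show (['A', 'C', 'G', 'T'] : List Char).attach =
            [⟨'A', by decide⟩, ⟨'C', by decide⟩, ⟨'G', by decide⟩, ⟨'T', by decide⟩] from rfl]
      simp only [List.foldl_cons, List.foldl_nil]
      rw [hrepl 'A', hrepl 'C', hrepl 'G', hrepl 'T']
      rw [ih _ (hcount 'A' (by decide)) _ rfl res,
        ih _ (hcount 'C' (by decide)) _ rfl _,
        ih _ (hcount 'G' (by decide)) _ rfl _,
        ih _ (hcount 'T' (by decide)) _ rfl _]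
      rw [hexp]
      simp [List.append_assoc]

-- ===== VERDICT (by name: the statement is the Claim_ definition above) =====
theorem get_qgramlist_help_py_spec : Claim_equal_get_qgramlist_help_py := by
  intro qgram result _
  unfold Spec_get_qgramlist_help_py get_qgramlist_help_py
  rw [pvAlt_eq, pvMain (qgram.toList.count 'N') qgram.toList rfl result]
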